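-- pv_equiv track=rewrite | github.com/facebookresearch/pytext | pytext/metric_reporters/channel.py | gen_content
-- ===== SOURCE A (Python) =====
-- def gen_content(metrics, loss, preds, targets, scores, context):
--     context_values = context.values()
--     for i in range(len(preds)):
--         # if we are running the metric reporter in memory_efficient mode
--         # then we don't store any scores
--         if len(scores) == 0:
--             res = [preds[i], targets[i]]
--         else:
--             res = [preds[i], targets[i], scores[i]]
--         res.extend([v_list[i] for v_list in context_values])
--         yield res
-- ===== SOURCE B (Python) =====
-- def gen_content(metrics, loss, preds, targets, scores, context):
--     # schema-then-project: build the column list once, then transpose with zip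
--     columns = [preds, targets]
--     if scores:
--         columns.append(scores)
--     columns.extend(context.values())
--     for row in zip(*columns):
--         yield list(row)
-- ===== Notes on version B (the rewrite author's own statement) =====
-- stated objective: idiomatic
-- what changed: B assembles the column list once (preds, targets, scores if present, context columns) and transposes it with zip, replacing A's per-row conditional list construction and inner comprehension with a single zip loop.
import Mathlib
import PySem

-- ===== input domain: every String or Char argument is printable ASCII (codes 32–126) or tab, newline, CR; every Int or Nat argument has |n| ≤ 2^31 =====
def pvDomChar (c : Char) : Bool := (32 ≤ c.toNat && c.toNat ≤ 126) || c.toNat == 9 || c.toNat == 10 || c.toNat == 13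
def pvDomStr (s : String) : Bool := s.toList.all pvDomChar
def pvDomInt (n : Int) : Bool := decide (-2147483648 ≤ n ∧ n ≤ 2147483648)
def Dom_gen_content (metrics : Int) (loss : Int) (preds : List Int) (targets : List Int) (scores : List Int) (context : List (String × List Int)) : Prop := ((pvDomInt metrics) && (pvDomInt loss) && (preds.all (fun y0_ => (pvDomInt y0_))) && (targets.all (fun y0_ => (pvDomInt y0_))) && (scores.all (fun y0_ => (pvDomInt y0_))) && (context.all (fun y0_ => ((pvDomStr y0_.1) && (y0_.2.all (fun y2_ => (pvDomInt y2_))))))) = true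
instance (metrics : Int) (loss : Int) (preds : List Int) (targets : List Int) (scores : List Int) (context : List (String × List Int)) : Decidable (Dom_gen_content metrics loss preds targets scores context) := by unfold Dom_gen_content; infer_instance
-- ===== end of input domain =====

-- ===== PORT A =====
-- for i in range(len(preds)): yield (row built per-row with a conditional, then extended with context columns)
def gen_content (metrics : Int) (loss : Int) (preds : List Int) (targets : List Int) (scores : List Int) (context : List (String × List Int)) : List (List Int) :=
  (PySem.List.pyRange 0 (preds.length : Int) 1).map (fun i =>
    (if scores.length = 0 then
        [PySem.List.pyGetD preds i 0, PySem.List.pyGetD targets i 0]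
      else
        [PySem.List.pyGetD preds i 0, PySem.List.pyGetD targets i 0, PySem.List.pyGetD scores i 0])
      ++ context.map (fun p => PySem.List.pyGetD p.2 i 0))

-- ===== PORT B =====
-- zip(*columns): rows while every column is non-empty (inside Pre_ that is exactly len(preds) rows)
def pvZipRows : List Int → List (List Int) → List (List Int)
  | [], _ => []
  | x :: xs, rest =>
      if rest.all (fun l => !l.isEmpty) then
        (x :: rest.map (fun l => l.headD 0)) :: pvZipRows xs (rest.map List.tail)
      else []

def gen_content_alt (metrics : Int) (loss : Int) (preds : List Int) (targets : List Int) (scores : List Int) (context : List (String × List Int)) : List (List Int) :=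
  let rest := targets :: ((if scores.isEmpty then [] else [scores]) ++ context.map Prod.snd)
  pvZipRows preds rest

-- ===== PRECONDITION & SPEC =====
-- Pre_ excludes exactly the inputs where A raises IndexError: some column shorter than preds.
def Pre_gen_content (metrics : Int) (loss : Int) (preds : List Int) (targets : List Int) (scores : List Int) (context : List (String × List Int)) : Prop :=
  preds.length ≤ targets.length ∧ (scores ≠ [] → preds.length ≤ scores.length) ∧
  ∀ p ∈ context, preds.length ≤ p.2.length
instance (metrics : Int) (loss : Int) (preds : List Int) (targets : List Int) (scores : List Int) (context : List (String × List Int)) : Decidable (Pre_gen_content metrics loss preds targets scores context) := by unfold Pre_gen_content; infer_instance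
def pvWitness_gen_content : Int × Int × List Int × List Int × List Int × (List (String × List Int)) := (0, 0, [1, 2], [3, 4], [5, 6], [("c", [7, 8])])
def Spec_gen_content (metrics : Int) (loss : Int) (preds : List Int) (targets : List Int) (scores : List Int) (context : List (String × List Int)) (out : List (List Int)) : Prop := out = gen_content_alt metrics loss preds targets scores context
instance (metrics : Int) (loss : Int) (preds : List Int) (targets : List Int) (scores : List Int) (context : List (String × List Int)) (out : List (List Int)) : Decidable (Spec_gen_content metrics loss preds targets scores context out) := by unfold Spec_gen_content; infer_instance

-- ===== CLAIM (what is proved, stated in full; the proofs are below) =====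
def Claim_equal_gen_content : Prop := ∀ (metrics : Int) (loss : Int) (preds : List Int) (targets : List Int) (scores : List Int) (context : List (String × List Int)), Dom_gen_content metrics loss preds targets scores context → Pre_gen_content metrics loss preds targets scores context → Spec_gen_content metrics loss preds targets scores context (gen_content metrics loss preds targets scores context)

-- ===== LEMMAS AND PROOFS =====
lemma pvZipRows_eq (c : List Int) (rest : List (List Int))
    (h : ∀ l ∈ rest, c.length ≤ l.length) :
    pvZipRows c rest =
      (List.range c.length).map (fun k => c.getD k 0 :: rest.map (fun l => l.getD k 0)) := by
  induction c generalizing rest with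
  | nil => simp [pvZipRows]
  | cons x xs ih =>
    have hne : rest.all (fun l => !l.isEmpty) = true := by
      simp only [List.all_eq_true]
      intro l hl
      have := h l hl
      cases l with
      | nil => simp at this
      | cons _ _ => simp
    rw [pvZipRows, if_pos hne]
    simp only [List.length_cons]
    rw [List.range_succ_eq_map]
    simp only [List.map_cons, List.map_map]
    congr 1
    · congr 1
      apply List.map_congr_left
      intro l hl
      cases l with
      | nil => exact absurd (h [] hl) (by simp)
      | cons a as => rfl
    · rw [ih (rest.map List.tail) ?_]
      · apply List.map_congr_left
        intro k _
        congr 1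
        rw [List.map_map]
        apply List.map_congr_left
        intro l hl
        cases l with
        | nil => exact absurd (h [] hl) (by simp)
        | cons a as => rfl
      · intro l hl
        obtain ⟨m, hm, rfl⟩ := List.mem_map.mp hl
        have := h m hm
        cases m with
        | nil => simp at this
        | cons a as => simpa using this


-- ===== VERDICT (by name: the statement is the Claim_ definition above) =====
theorem gen_content_spec : Claim_equal_gen_content := by
  intro metrics loss preds targets scores context _ hpre
  obtain ⟨ht, hs, hc⟩ := hpre
  unfold Spec_gen_content gen_content gen_content_alt
  rw [pvZipRows_eq]
  · rw [PySem.List.pyRange_zero_natCast, List.map_map]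
    apply List.map_congr_left
    intro k hk
    simp only [Function.comp, PySem.List.pyGetD_natCast]
    by_cases hsc : scores = []
    · subst hsc
      simp [List.map_map]
    · simp [hsc, List.isEmpty_iff, List.length_eq_zero_iff, List.map_map]
  · intro l hl
    simp only [List.mem_cons, List.mem_append, List.mem_map] at hl
    rcases hl with rfl | hl | ⟨p, hp, rfl⟩
    · exact ht
    · rcases hsc : scores.isEmpty with _ | _
      · rw [hsc] at hl; simp at hl
        subst hl; exact hs (by simpa using hsc)
      · rw [hsc] at hl; simp at hl
    · exact hc p hp
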